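-- pv_equiv track=rewrite | github.com/pypi-data/pypi-mirror-357 | packages/atgtools/atgtools-0.1.9b0-py3-none-any.whl/atg/lefse/format_simplified.py | _create_unique_subclass_names
-- ===== SOURCE A (Python) =====
-- from typing import Dict, List, Tuple, Union, Optional
--
-- def _create_unique_subclass_names(classes: List[str], subclasses: List[str]) -> List[str]:
--     """
--     Ensure subclass names are unique to prevent statistical test confusion.
--
--     Ambiguous subclass names across different classes would lead to incorrect
--     statistical groupings and invalid biomarker identification.
--     """
--     subclass_to_classes = {}
--     for cls, subcls in zip(classes, subclasses):
--         if subcls not in subclass_to_classes: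
--             subclass_to_classes[subcls] = set()
--         subclass_to_classes[subcls].add(cls)
--
--     # Identify subclasses that would cause statistical ambiguity
--     conflicting = {
--         subcls for subcls, cls_set in subclass_to_classes.items()
--         if len(cls_set) > 1
--     }
--
--     return [
--         f"{cls}_{subcls}" if subcls in conflicting else subcls
--         for cls, subcls in zip(classes, subclasses)
--     ]
-- ===== SOURCE B (Python) =====
-- def _create_unique_subclass_names(classes, subclasses):
--     """Direct per-element test, no auxiliary dict/set: a subclass name is
--     ambiguous at a position exactly when some other position pairs the same
--     subclass with a different class."""
--     pairs = list(zip(classes, subclasses))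
--     return [f"{c}_{s}" if any(s2 == s and c2 != c for c2, s2 in pairs) else s
--             for c, s in pairs]
-- ===== Notes on version B (the rewrite author's own statement) =====
-- stated objective: alternative
-- what changed: B drops A's whole precomputation (the dict of per-subclass class sets and the len>1 filtering pass) and instead decides ambiguity directly per position with an inner scan: a subclass at position i gets the class prefix iff some pair carries the same subclass with a different class; correctness: a subclass is mapped to >1 distinct classes iff, for any one of its classes c, some pair has that subclass with a class != c.
import Mathlib
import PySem

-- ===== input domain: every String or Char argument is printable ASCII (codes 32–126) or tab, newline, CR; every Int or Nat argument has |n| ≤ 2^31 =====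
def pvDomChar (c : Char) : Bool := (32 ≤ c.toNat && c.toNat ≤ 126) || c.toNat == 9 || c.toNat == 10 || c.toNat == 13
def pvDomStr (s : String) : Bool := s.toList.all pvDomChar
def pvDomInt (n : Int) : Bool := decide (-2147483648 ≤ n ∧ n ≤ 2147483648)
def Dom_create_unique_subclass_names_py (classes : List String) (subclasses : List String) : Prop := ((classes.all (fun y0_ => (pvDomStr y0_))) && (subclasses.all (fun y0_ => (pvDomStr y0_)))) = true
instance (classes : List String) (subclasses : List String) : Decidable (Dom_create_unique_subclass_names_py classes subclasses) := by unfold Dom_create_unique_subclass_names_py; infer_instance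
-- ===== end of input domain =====

-- B drops A's precomputation (dict of per-subclass class sets + len>1 filter) and decides ambiguity
-- directly per position with an inner scan over the pair list (objective: alternative).

-- ===== PORT A =====
def create_unique_subclass_names_py (classes : List String) (subclasses : List String) : List String :=
  -- subclass_to_classes = {}; for cls, subcls in zip(...): if subcls not in ...: ... = set(); ....add(cls)
  let subclass_to_classes : PySem.Dict String (PySem.Set String) :=
    (classes.zip subclasses).foldl
      (fun d p =>
        let d := if d.contains p.2 = false then d.insert p.2 PySem.Set.empty else d
        d.modify p.2 PySem.Set.empty (fun s => PySem.Set.add s p.1))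
      PySem.Dict.empty
  -- conflicting = {subcls for subcls, cls_set in ....items() if len(cls_set) > 1}
  let conflicting : PySem.Set String :=
    PySem.Set.ofList
      ((subclass_to_classes.items.filter (fun q => decide (1 < PySem.Set.len q.2))).map Prod.fst)
  -- [f"{cls}_{subcls}" if subcls in conflicting else subcls for cls, subcls in zip(...)]
  (classes.zip subclasses).map
    (fun p => if conflicting.contains p.2 then p.1 ++ "_" ++ p.2 else p.2)

-- ===== PORT B =====
def create_unique_subclass_names_py_alt (classes : List String) (subclasses : List String) : List String :=
  -- pairs = list(zip(classes, subclasses))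
  let pairs := classes.zip subclasses
  -- [f"{c}_{s}" if any(s2 == s and c2 != c for c2, s2 in pairs) else s for c, s in pairs]
  pairs.map
    (fun p => if pairs.any (fun q => q.2 == p.2 && !(q.1 == p.1)) then p.1 ++ "_" ++ p.2 else p.2)

-- ===== PRECONDITION & SPEC =====
def Spec_create_unique_subclass_names_py (classes : List String) (subclasses : List String) (out : List String) : Prop := out = create_unique_subclass_names_py_alt classes subclasses
instance (classes : List String) (subclasses : List String) (out : List String) : Decidable (Spec_create_unique_subclass_names_py classes subclasses out) := by unfold Spec_create_unique_subclass_names_py; infer_instance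

-- ===== CLAIM (what is proved, stated in full; the proofs are below) =====
def Claim_equal_create_unique_subclass_names_py : Prop := ∀ (classes : List String) (subclasses : List String), Dom_create_unique_subclass_names_py classes subclasses → Spec_create_unique_subclass_names_py classes subclasses (create_unique_subclass_names_py classes subclasses)

-- ===== LEMMAS AND PROOFS =====

-- A's loop step, named for the proofs
def pvStepA (d : PySem.Dict String (PySem.Set String)) (p : String × String) :
    PySem.Dict String (PySem.Set String) :=
  let d := if d.contains p.2 = false then d.insert p.2 PySem.Set.empty else d
  d.modify p.2 PySem.Set.empty (fun s => PySem.Set.add s p.1)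

-- the invariant: A's dict maps each subclass to the (duplicate-free) set of classes paired with it in l
def pvInvA (d : PySem.Dict String (PySem.Set String)) (l : List (String × String)) : Prop :=
  d.keys.Nodup ∧ ∀ s : String,
    (d.getD s PySem.Set.empty).Nodup ∧
    ∀ c : String, c ∈ d.getD s PySem.Set.empty ↔ (c, s) ∈ l

lemma pvInvA_empty : pvInvA PySem.Dict.empty [] := by
  refine ⟨PySem.Dict.nodup_keys_empty, fun s => ⟨?_, fun c => ?_⟩⟩ <;>
    simp [PySem.Dict.getD_empty, PySem.Set.empty]

lemma pvInvA_congr (d : PySem.Dict String (PySem.Set String)) (l l' : List (String × String))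
    (hmem : ∀ x, x ∈ l ↔ x ∈ l') (h : pvInvA d l) : pvInvA d l' := by
  refine ⟨h.1, fun s => ⟨(h.2 s).1, fun c => ?_⟩⟩
  rw [(h.2 s).2 c, hmem]

lemma pvSet_contains_iff (s : PySem.Set String) (x : String) :
    s.contains x = true ↔ x ∈ s := by
  simp [PySem.Set.contains]

lemma pvStepA_getD (d : PySem.Dict String (PySem.Set String)) (p : String × String) (s : String) :
    (pvStepA d p).getD s PySem.Set.empty =
      if s = p.2 then PySem.Set.add (d.getD p.2 PySem.Set.empty) p.1
      else d.getD s PySem.Set.empty := by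
  unfold pvStepA
  by_cases hc : d.contains p.2 = false
  · rw [if_pos hc, PySem.Dict.getD_modify]
    rw [PySem.Dict.getD_of_not_contains d PySem.Set.empty hc]
    by_cases hs : s = p.2
    · rw [if_pos hs, if_pos hs, PySem.Dict.getD_insert, if_pos rfl]
    · rw [if_neg hs, if_neg hs, PySem.Dict.getD_insert, if_neg hs]
  · rw [if_neg hc, PySem.Dict.getD_modify]

lemma pvStepA_keys_nodup (d : PySem.Dict String (PySem.Set String)) (p : String × String)
    (h : d.keys.Nodup) : (pvStepA d p).keys.Nodup := by
  unfold pvStepA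
  by_cases hc : d.contains p.2 = false
  · rw [if_pos hc, PySem.Dict.keys_modify]
    exact PySem.Dict.nodup_keys_insert _ _ _ (PySem.Dict.nodup_keys_insert _ _ _ h)
  · rw [if_neg hc, PySem.Dict.keys_modify]
    exact PySem.Dict.nodup_keys_insert _ _ _ h

lemma pvInvA_step (d : PySem.Dict String (PySem.Set String)) (l : List (String × String))
    (p : String × String) (h : pvInvA d l) : pvInvA (pvStepA d p) (p :: l) := by
  refine ⟨pvStepA_keys_nodup d p h.1, fun s => ?_⟩
  rw [pvStepA_getD]
  by_cases hs : s = p.2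
  · subst hs
    rw [if_pos rfl]
    refine ⟨PySem.Set.nodup_add _ _ (h.2 p.2).1, fun c => ?_⟩
    rw [PySem.Set.mem_add, (h.2 p.2).2 c]
    constructor
    · rintro (hm | rfl)
      · exact List.mem_cons_of_mem _ hm
      · exact List.mem_cons_self ..
    · intro hm
      rcases List.mem_cons.1 hm with heq | hm
      · right; exact (Prod.mk.injEq _ _ _ _ ▸ heq).1
      · left; exact hm
  · rw [if_neg hs]
    refine ⟨(h.2 s).1, fun c => ?_⟩
    rw [(h.2 s).2 c]
    constructor
    · exact fun hm => List.mem_cons_of_mem _ hm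
    · intro hm
      rcases List.mem_cons.1 hm with heq | hm
      · exact absurd (Prod.mk.injEq _ _ _ _ ▸ heq).2 hs
      · exact hm

lemma pvInvA_foldl (l l0 : List (String × String)) (d : PySem.Dict String (PySem.Set String))
    (h : pvInvA d l0) : pvInvA (l.foldl pvStepA d) (l ++ l0) := by
  induction l generalizing d l0 with
  | nil => simpa using h
  | cons p rest ih =>
    refine pvInvA_congr _ (rest ++ (p :: l0)) _ (fun x => by simp; tauto) ?_
    exact ih (p :: l0) (pvStepA d p) (pvInvA_step d l0 p h)

-- membership in A's 'conflicting' set, in terms of getD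
lemma pvConflA (d : PySem.Dict String (PySem.Set String)) (hnd : d.keys.Nodup) (s : String) :
    (PySem.Set.ofList
      ((d.items.filter (fun q => decide (1 < PySem.Set.len q.2))).map Prod.fst)).contains s
      = decide (1 < (d.getD s PySem.Set.empty).length) := by
  have hmemL :
      (PySem.Set.ofList ((d.items.filter (fun q => decide (1 < PySem.Set.len q.2))).map Prod.fst)).contains s = true
        ↔ ∃ cs : PySem.Set String, (s, cs) ∈ d.items ∧ 1 < PySem.Set.len cs := by
    rw [pvSet_contains_iff, PySem.Set.mem_ofList]
    simp only [List.mem_map, List.mem_filter]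
    constructor
    · rintro ⟨q, ⟨hq, hq2⟩, rfl⟩
      exact ⟨q.2, hq, by simpa using hq2⟩
    · rintro ⟨cs, hmem2, hlt⟩
      exact ⟨(s, cs), ⟨hmem2, by simpa using hlt⟩, rfl⟩
  cases hg : d.get? s with
  | none =>
    have hgd : d.getD s PySem.Set.empty = [] := PySem.Dict.getD_of_get?_eq_none d _ hg
    rw [hgd]
    cases hx : (PySem.Set.ofList ((d.items.filter (fun q => decide (1 < PySem.Set.len q.2))).map Prod.fst)).contains s with
    | false => simp
    | true =>
      obtain ⟨cs, hmem2, _⟩ := hmemL.1 hx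
      have := PySem.Dict.get?_of_mem_items d hmem2 hnd
      rw [hg] at this
      exact absurd this (by simp)
  | some v =>
    have hgd : d.getD s PySem.Set.empty = v := PySem.Dict.getD_of_get?_eq_some d _ hg
    rw [hgd]
    by_cases hlen : 1 < v.length
    · rw [hmemL.2 ⟨v, PySem.Dict.mem_items_of_get?_eq_some d hg, by
        simp only [PySem.Set.len]; exact_mod_cast hlen⟩]
      simp [hlen]
    · cases hx : (PySem.Set.ofList ((d.items.filter (fun q => decide (1 < PySem.Set.len q.2))).map Prod.fst)).contains s with
      | false => simp [hlen]
      | true =>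
        obtain ⟨cs, hmem2, hlt⟩ := hmemL.1 hx
        have hcs := PySem.Dict.get?_of_mem_items d hmem2 hnd
        rw [hg] at hcs
        obtain rfl : cs = v := by simpa using hcs.symm
        refine absurd ?_ hlen
        simp only [PySem.Set.len] at hlt
        exact_mod_cast hlt

-- a duplicate-free list containing a has length > 1 iff it contains some element ≠ a
lemma pvLen_lt (v : List String) (a : String) (hnd : v.Nodup) (ha : a ∈ v) :
    1 < v.length ↔ ∃ c ∈ v, c ≠ a := by
  constructor
  · intro hlen
    by_contra hno
    push Not at hno
    cases v with
    | nil => simp at ha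
    | cons x t =>
      cases t with
      | nil => simp at hlen
      | cons y u =>
        have hx : x = a := hno x (by simp)
        have hy : y = a := hno y (by simp)
        have : x ≠ y := by
          have := (List.nodup_cons.1 hnd).1
          simp at this
          exact fun h => this.1 (h ▸ rfl) |>.elim
        exact this (hx.trans hy.symm)
  · rintro ⟨c, hc, hne⟩
    have h1 : c ∈ v.erase a := (List.mem_erase_of_ne hne).2 hc
    have h2 : (v.erase a).length = v.length - 1 := List.length_erase_of_mem ha
    have h3 : 0 < (v.erase a).length := List.length_pos_of_mem h1
    omega

-- ===== VERDICT (by name: the statement is the Claim_ definition above) =====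
theorem create_unique_subclass_names_py_spec : Claim_equal_create_unique_subclass_names_py := by
  intro classes subclasses _
  unfold Spec_create_unique_subclass_names_py
  unfold create_unique_subclass_names_py create_unique_subclass_names_py_alt
  simp only []
  have hinv : pvInvA ((classes.zip subclasses).foldl pvStepA PySem.Dict.empty)
      (classes.zip subclasses) := by
    have := pvInvA_foldl (classes.zip subclasses) [] PySem.Dict.empty pvInvA_empty
    simpa using this
  rw [show (fun (d : PySem.Dict String (PySem.Set String)) (p : String × String) =>
        let d := if d.contains p.2 = false then d.insert p.2 PySem.Set.empty else d;
        d.modify p.2 PySem.Set.empty fun s => PySem.Set.add s p.1) = pvStepA from rfl]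
  apply List.map_congr_left
  intro p hp
  set d := (classes.zip subclasses).foldl pvStepA PySem.Dict.empty with hd
  set v := d.getD p.2 PySem.Set.empty with hv
  have hcond :
      (PySem.Set.ofList ((d.items.filter (fun q => decide (1 < PySem.Set.len q.2))).map Prod.fst)).contains p.2
        = (classes.zip subclasses).any (fun q => q.2 == p.2 && !(q.1 == p.1)) := by
    rw [pvConflA d hinv.1 p.2]
    have hmemv : ∀ c, c ∈ v ↔ (c, p.2) ∈ classes.zip subclasses := (hinv.2 p.2).2
    have hav : p.1 ∈ v := (hmemv p.1).2 hp
    have hiff := pvLen_lt v p.1 (hinv.2 p.2).1 hav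
    cases hany : (classes.zip subclasses).any (fun q => q.2 == p.2 && !(q.1 == p.1)) with
    | true =>
      simp only [List.any_eq_true, Bool.and_eq_true, beq_iff_eq, Bool.not_eq_true', beq_eq_false_iff_ne] at hany
      obtain ⟨q, hq, hq2, hq1⟩ := hany
      have hq' : (q.1, q.2) ∈ classes.zip subclasses := by simpa using hq
      have : q.1 ∈ v := (hmemv q.1).2 (hq2 ▸ hq')
      exact decide_eq_true (hiff.2 ⟨q.1, this, hq1⟩)
    | false =>
      simp only [List.any_eq_false, Bool.and_eq_true, beq_iff_eq, Bool.not_eq_true', beq_eq_false_iff_ne, not_and] at hany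
      have hno : ¬ ∃ c ∈ v, c ≠ p.1 := by
        rintro ⟨c, hc, hne⟩
        exact hne (by simpa using hany (c, p.2) ((hmemv c).1 hc) rfl)
      exact decide_eq_false (fun h => hno (hiff.1 h))
  rw [hcond]
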